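-- pv_equiv track=rewrite | github.com/davidt315/Data-Structures-and-Algorithms | hw1/dtarazi.py | max_increasing
-- ===== SOURCE A (Python) =====
-- def max_increasing(mylist):
--     """
--     Returns the sublist of input mylist with the most consecutive increasing ints
--
--     mylist: input list of ints
--     """
--     max = 1     # max count
--     count = 1   # current count
--     index = 0   # start of max index
--     for i in range(len(mylist) - 1):
--         if (mylist[i+1] > mylist[i]):
--             count += 1
--             # updates the max increasing count and index
--             if (count > max):
--                 max = count
--                 index = (i+2) - max
--         else:
--             count = 1   # resets count
--     # for empty list, this is mylist[0:1] which is the input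
--     return mylist[index:index+max]
-- ===== SOURCE B (Python) =====
-- def max_increasing(mylist):
--     """
--     Returns the sublist of input mylist with the most consecutive increasing ints
--
--     mylist: input list of ints
--     """
--     if not mylist:
--         return []
--     runs = []           # completed maximal strictly-increasing runs, in order
--     cur = [mylist[0]]   # current run
--     for x in mylist[1:]:
--         if x > cur[-1]:
--             cur.append(x)
--         else:
--             runs.append(cur)
--             cur = [x]
--     runs.append(cur)
--     # max keeps the first run on length ties, matching A's earliest-longest choice
--     return max(runs, key=len)
-- ===== Notes on version B (the rewrite author's own statement) =====
-- stated objective: simpler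
-- what changed: Instead of tracking count/max/start-index counters and slicing the input at the end, B partitions the list into its maximal strictly-increasing runs in one pass and returns the first longest run with max(runs, key=len).
import Mathlib
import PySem

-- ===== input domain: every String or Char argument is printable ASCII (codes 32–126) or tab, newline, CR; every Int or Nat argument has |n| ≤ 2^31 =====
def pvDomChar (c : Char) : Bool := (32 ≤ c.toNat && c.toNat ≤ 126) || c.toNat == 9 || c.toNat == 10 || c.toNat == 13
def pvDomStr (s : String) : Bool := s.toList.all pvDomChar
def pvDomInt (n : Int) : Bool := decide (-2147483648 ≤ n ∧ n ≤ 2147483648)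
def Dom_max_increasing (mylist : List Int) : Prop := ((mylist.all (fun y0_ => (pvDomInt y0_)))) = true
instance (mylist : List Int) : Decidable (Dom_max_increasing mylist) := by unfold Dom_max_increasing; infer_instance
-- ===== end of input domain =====

-- B replaces A's count/max/start-index bookkeeping by a one-pass partition into
-- maximal strictly-increasing runs followed by max(runs, key=len) (simpler decomposition).

-- ===== PORT A =====
-- loop body of A's for-loop; state is (max, count, index); indices i and i+1 are
-- always in range (i ∈ range(len-1)), so pyGetD's default is never used
def aStep (l : List Int) (s : Int × Int × Int) (i : Int) : Int × Int × Int :=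
  if PySem.List.pyGetD l (i + 1) 0 > PySem.List.pyGetD l i 0 then
    let cnt := s.2.1 + 1
    if cnt > s.1 then (cnt, cnt, (i + 2) - cnt) else (s.1, cnt, s.2.2)
  else (s.1, 1, s.2.2)

def max_increasing (mylist : List Int) : List Int :=
  let s := (PySem.List.pyRange 0 ((mylist.length : Int) - 1) 1).foldl (aStep mylist) (1, 1, 0)
  PySem.List.slice mylist (some s.2.2) (some (s.2.2 + s.1))

-- ===== PORT B =====
-- pick is Python's max(_, key=len) comparison step: keep the first on ties
def pick (b r : List Int) : List Int := if r.length > b.length then r else b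

-- loop body of B's for-loop; state is (runs, cur); cur[-1] via pyGet? (cur never empty)
def bStep (s : List (List Int) × List Int) (y : Int) : List (List Int) × List Int :=
  if y > (PySem.List.pyGet? s.2 (-1)).getD 0 then (s.1, s.2 ++ [y]) else (s.1 ++ [s.2], [y])

def max_increasing_alt (mylist : List Int) : List Int :=
  match mylist with
  | [] => []
  | x :: xs =>
    -- runs = completed runs ++ [cur]; max(runs, key=len) = first run of maximal length
    match (xs.foldl bStep ([], [x])).1 ++ [(xs.foldl bStep ([], [x])).2] with
    | [] => []
    | r :: rs => rs.foldl pick r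

-- ===== PRECONDITION & SPEC =====
def Spec_max_increasing (mylist : List Int) (out : List Int) : Prop := out = max_increasing_alt mylist
instance (mylist : List Int) (out : List Int) : Decidable (Spec_max_increasing mylist out) := by unfold Spec_max_increasing; infer_instance

-- ===== CLAIM (what is proved, stated in full; the proofs are below) =====
def Claim_equal_max_increasing : Prop := ∀ (mylist : List Int), Dom_max_increasing mylist → Spec_max_increasing mylist (max_increasing mylist)

-- ===== LEMMAS AND PROOFS =====

-- A's loop rewritten as structural recursion over the not-yet-compared tail;
-- prev is the element at index i, y at i+1, and p = i + 2.
def aRec (prev : Int) (s : Int × Int × Int) (p : Int) : List Int → Int × Int × Int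
  | [] => s
  | y :: ys =>
      aRec y
        (if y > prev then
          (if s.2.1 + 1 > s.1 then (s.2.1 + 1, s.2.1 + 1, p - (s.2.1 + 1)) else (s.1, s.2.1 + 1, s.2.2))
         else (s.1, 1, s.2.2)) (p + 1) ys

-- B's loop fused with the final max-fold: best = first longest completed run so far
def gRec (best cur : List Int) (prev : Int) : List Int → List Int
  | [] => pick best cur
  | y :: ys => if y > prev then gRec best (cur ++ [y]) y ys else gRec (pick best cur) [y] y ys

lemma pick_len_left (b r : List Int) : b.length ≤ (pick b r).length := by
  unfold pick; split <;> omega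
lemma pick_len_right (b r : List Int) : r.length ≤ (pick b r).length := by
  unfold pick; split <;> omega
lemma pick_eq_right {b r : List Int} (h : r.length > b.length) : pick b r = r := by
  unfold pick; simp [h]
lemma pick_eq_left {b r : List Int} (h : r.length ≤ b.length) : pick b r = b := by
  unfold pick; simp; omega

lemma getD_append_length (pre : List Int) (z : Int) (rest : List Int) :
    (pre ++ z :: rest).getD pre.length 0 = z := by
  simp [List.getD_eq_getElem?_getD]

lemma slice_mid (pre mid rest : List Int) :
    PySem.List.slice (pre ++ mid ++ rest) (some (pre.length : Int))
      (some ((pre.length : Int) + (mid.length : Int))) = mid := by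
  rw [PySem.List.slice_natCast_add, List.append_assoc, List.drop_left, List.take_left]

-- A's pyRange/pyGetD loop is the value-passing recursion aRec
lemma loopA : ∀ (xs pre : List Int) (x : Int) (s : Int × Int × Int) (l : List Int),
    l = pre ++ x :: xs →
    (PySem.List.pyRange (pre.length : Int) ((l.length : Int) - 1) 1).foldl (aStep l) s
      = aRec x s ((pre.length : Int) + 2) xs := by
  intro xs
  induction xs with
  | nil =>
    intro pre x s l hl
    subst hl
    rw [PySem.List.pyRange_one_eq_nil (by simp)]
    simp [aRec]
  | cons y ys ih =>
    intro pre x s l hl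
    subst hl
    rw [PySem.List.pyRange_one_cons (by simp; omega)]
    rw [List.foldl_cons]
    have hx : PySem.List.pyGetD (pre ++ x :: y :: ys) ((pre.length : Int)) 0 = x := by
      rw [PySem.List.pyGetD_natCast]; exact getD_append_length pre x (y :: ys)
    have hy : PySem.List.pyGetD (pre ++ x :: y :: ys) ((pre.length : Int) + 1) 0 = y := by
      have : ((pre.length : Int) + 1) = ((pre ++ [x]).length : Int) := by simp
      rw [this, PySem.List.pyGetD_natCast]
      have : pre ++ x :: y :: ys = (pre ++ [x]) ++ y :: ys := by simp
      rw [this]; exact getD_append_length (pre ++ [x]) y ys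
    have h2 : pre ++ x :: y :: ys = (pre ++ [x]) ++ y :: ys := by simp
    have := ih (pre ++ [x]) y (aStep (pre ++ x :: y :: ys) s (pre.length : Int)) (pre ++ x :: y :: ys) h2
    simp only [List.length_append, List.length_cons, List.length_nil] at this ⊢
    have hcast : ((pre.length + 1 : Nat) : Int) = (pre.length : Int) + 1 := by push_cast; ring
    rw [hcast] at this
    rw [this]
    show aRec y (aStep _ s _) _ ys = aRec x s _ (y :: ys)
    have hs : aStep (pre ++ x :: y :: ys) s (pre.length : Int)
        = (if y > x then
            (if s.2.1 + 1 > s.1 then (s.2.1 + 1, s.2.1 + 1, ((pre.length : Int) + 2) - (s.2.1 + 1))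
             else (s.1, s.2.1 + 1, s.2.2))
           else (s.1, 1, s.2.2)) := by
      simp only [aStep, hx, hy]
    have hp : (pre.length : Int) + 1 + 2 = ((pre.length : Int) + 2) + 1 := by ring
    rw [hs, hp]
    rw [aRec]

-- B's loop keeps every accumulated run non-empty
lemma bStep_ne : ∀ (xs : List Int) (runs : List (List Int)) (cur : List Int),
    (∀ r ∈ runs, r ≠ []) → cur ≠ [] →
    (∀ r ∈ (xs.foldl bStep (runs, cur)).1, r ≠ []) ∧ (xs.foldl bStep (runs, cur)).2 ≠ [] := by
  intro xs
  induction xs with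
  | nil => intro runs cur h1 h2; exact ⟨h1, h2⟩
  | cons y ys ih =>
    intro runs cur h1 h2
    simp only [List.foldl_cons, bStep]
    split
    · exact ih runs (cur ++ [y]) h1 (by simp)
    · refine ih (runs ++ [cur]) [y] ?_ (by simp)
      intro r hr
      rcases List.mem_append.mp hr with h | h
      · exact h1 r h
      · simp at h; simp [h, h2]

lemma pyLast_eq (cur : List Int) (h : cur ≠ []) :
    (PySem.List.pyGet? cur (-1)).getD 0 = cur.getLastD 0 := by
  rw [PySem.List.pyGet?_neg_one]
  cases cur with
  | nil => simp at h
  | cons a t => simp [List.getLastD_eq_getLast?]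

-- B's loop followed by the max-fold is the fused recursion gRec
lemma bStep_pick : ∀ (xs : List Int) (runs : List (List Int)) (cur : List Int), cur ≠ [] →
    ((xs.foldl bStep (runs, cur)).1 ++ [(xs.foldl bStep (runs, cur)).2]).foldl pick []
      = gRec (runs.foldl pick []) cur (cur.getLastD 0) xs := by
  intro xs
  induction xs with
  | nil => intro runs cur h; simp [gRec, List.foldl_append]
  | cons y ys ih =>
    intro runs cur h
    simp only [List.foldl_cons, bStep, gRec, pyLast_eq cur h]
    split
    · rw [ih runs (cur ++ [y]) (by simp)]
      simp
    · rw [ih (runs ++ [cur]) [y] (by simp)]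
      simp [List.foldl_append]

-- the heart: aRec's (max, count, index) slices out exactly gRec's first longest run
lemma main : ∀ (xs pre cur best : List Int) (mx cnt idx : Int),
    cur ≠ [] →
    cnt = (cur.length : Int) →
    mx = ((pick best cur).length : Int) →
    PySem.List.slice (pre ++ cur ++ xs) (some idx) (some (idx + mx)) = pick best cur →
    (let s := aRec (cur.getLastD 0) (mx, cnt, idx) ((pre.length : Int) + (cur.length : Int) + 1) xs
     PySem.List.slice (pre ++ cur ++ xs) (some s.2.2) (some (s.2.2 + s.1))
       = gRec best cur (cur.getLastD 0) xs) := by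
  intro xs
  induction xs with
  | nil =>
    intro pre cur best mx cnt idx hne hcnt hmx hsl
    simpa [aRec, gRec] using hsl
  | cons y ys ih =>
    intro pre cur best mx cnt idx hne hcnt hmx hsl
    have hcurpos : 0 < cur.length := List.length_pos_of_ne_nil hne
    simp only [aRec, gRec]
    by_cases hgt : y > cur.getLastD 0
    · simp only [if_pos hgt]
      by_cases hbig : cnt + 1 > mx
      · simp only [if_pos hbig]
        -- new leader: cur ++ [y]
        have hpk : pick best (cur ++ [y]) = cur ++ [y] := by
          apply pick_eq_right
          have := pick_len_left best cur
          simp only [List.length_append, List.length_cons, List.length_nil]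
          omega
        have hassoc : pre ++ cur ++ y :: ys = pre ++ (cur ++ [y]) ++ ys := by simp
        have hidx : (pre.length : Int) + (cur.length : Int) + 1 - (cnt + 1) = (pre.length : Int) := by
          rw [hcnt]; ring
        have hsl' : PySem.List.slice (pre ++ (cur ++ [y]) ++ ys) (some (pre.length : Int))
            (some ((pre.length : Int) + (cnt + 1))) = pick best (cur ++ [y]) := by
          rw [hpk, hcnt]
          have : ((pre.length : Int)) + ((cur.length : Int) + 1) = (pre.length : Int) + (((cur ++ [y]).length : Int)) := by
            push_cast; simp
          rw [this]
          exact slice_mid pre (cur ++ [y]) ys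
        have := ih pre (cur ++ [y]) best (cnt + 1) (cnt + 1) (pre.length : Int)
          (by simp) (by rw [hcnt]; push_cast; simp)
          (by rw [hpk, hcnt]; push_cast; simp)
          hsl'
        simp only [List.getLastD_concat] at this
        rw [hassoc, hidx]
        have hp : (pre.length : Int) + (cur.length : Int) + 1 + 1
            = (pre.length : Int) + ((cur ++ [y]).length : Int) + 1 := by push_cast; simp; ring
        rw [hp]
        exact this
      · simp only [if_neg hbig]
        -- cur grows but best stays the leader
        have hble : cur.length ≤ best.length := by
          by_contra hlt
          push_neg at hlt
          rw [pick_eq_right hlt] at hmx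
          omega
        have hpb : pick best cur = best := pick_eq_left hble
        have hpk : pick best (cur ++ [y]) = best := by
          apply pick_eq_left
          simp only [List.length_append, List.length_cons, List.length_nil]
          rw [hpb] at hmx
          omega
        have hassoc : pre ++ cur ++ y :: ys = pre ++ (cur ++ [y]) ++ ys := by simp
        have := ih pre (cur ++ [y]) best mx (cnt + 1) idx
          (by simp) (by rw [hcnt]; push_cast; simp)
          (by rw [hpk]; rw [hpb] at hmx; exact hmx)
          (by rw [hpk]; rw [hpb] at hsl; rw [← hassoc]; exact hsl)
        simp only [List.getLastD_concat] at this
        rw [hassoc]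
        have hp : (pre.length : Int) + (cur.length : Int) + 1 + 1
            = (pre.length : Int) + ((cur ++ [y]).length : Int) + 1 := by push_cast; simp; ring
        rw [hp]
        exact this
    · simp only [if_neg hgt]
      -- run ends: close cur into best' = pick best cur, restart with [y]
      have hlen1 : 1 ≤ (pick best cur).length := le_trans hcurpos (pick_len_right best cur)
      have hpk : pick (pick best cur) [y] = pick best cur := by
        apply pick_eq_left; simpa using hlen1
      have hassoc : pre ++ cur ++ y :: ys = (pre ++ cur) ++ [y] ++ ys := by simp
      have := ih (pre ++ cur) [y] (pick best cur) mx 1 idx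
        (by simp) (by simp)
        (by rw [hpk]; exact hmx)
        (by rw [hpk, ← hassoc]; exact hsl)
      have hy1 : (([y] : List Int).getLastD 0) = y := rfl
      rw [hy1] at this
      rw [hassoc]
      have hp : (pre.length : Int) + (cur.length : Int) + 1 + 1
          = (((pre ++ cur).length : Int)) + (([y] : List Int).length : Int) + 1 := by push_cast; simp
      rw [hp]
      exact this

-- B on a non-empty list is the fused recursion started at best = [], cur = [x]
lemma altB (x : Int) (xs : List Int) : max_increasing_alt (x :: xs) = gRec [] [x] x xs := by
  have hpick := bStep_pick xs [] [x] (by simp)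
  obtain ⟨h1, h2⟩ := bStep_ne xs [] [x] (by simp) (by simp)
  show (match (xs.foldl bStep ([], [x])).1 ++ [(xs.foldl bStep ([], [x])).2] with
        | [] => ([] : List Int)
        | r :: rs => rs.foldl pick r) = gRec [] [x] x xs
  simp only [List.foldl_nil] at hpick
  have hlast : (([x] : List Int).getLastD 0) = x := rfl
  rw [hlast] at hpick
  cases hq : (xs.foldl bStep ([], [x])).1 with
  | nil =>
    rw [hq] at hpick
    simp only [hq, List.nil_append]
    rw [← hpick]
    simp only [List.nil_append, List.foldl_cons, List.foldl_nil]
    rw [pick_eq_right (by simpa [List.length_pos_iff] using h2)]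
  | cons r rs =>
    have hr : r ≠ [] := h1 r (by rw [hq]; exact List.mem_cons_self)
    rw [hq] at hpick
    simp only [hq, List.cons_append]
    rw [← hpick]
    simp only [List.cons_append, List.foldl_cons]
    rw [pick_eq_right (by simpa [List.length_pos_iff] using hr)]

-- ===== VERDICT (by name: the statement is the Claim_ definition above) =====
theorem max_increasing_spec : Claim_equal_max_increasing := by
  intro mylist _
  show max_increasing mylist = max_increasing_alt mylist
  cases mylist with
  | nil => rfl
  | cons x xs =>
    rw [altB]
    simp only [max_increasing]
    have hA := loopA xs [] x (1, 1, 0) (x :: xs) (by simp)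
    simp only [List.length_nil, Nat.cast_zero, zero_add] at hA
    rw [hA]
    have hsl0 : PySem.List.slice (([] : List Int) ++ [x] ++ xs) (some 0) (some (0 + 1))
        = pick [] [x] := by
      have := slice_mid ([] : List Int) [x] xs
      simpa [pick] using this
    have hm := main xs [] [x] [] 1 1 0 (by simp) (by simp) (by simp [pick]) hsl0
    simp only [List.length_nil, Nat.cast_zero, List.length_cons, Nat.cast_one, zero_add] at hm
    have hlast : (([x] : List Int).getLastD 0) = x := rfl
    rw [hlast] at hm
    have h11 : (1 : Int) + 1 = 2 := by norm_num
    rw [h11] at hm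
    simpa [pick] using hm
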